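-- pv_equiv track=rewrite | github.com/Gihoon-Kim-Git/PPDS24F-Daily-Code | week06/20/Pr2.py | solution
-- ===== SOURCE A (Python) =====
-- def solution(A):
--     # Implement your solution here
--     #dynamic programming
--     n = len(A)
--     dp = [0] * n
--     dp[0] = A[0]
--     for i in range(1,n):
--         temp = dp[i-1] # -1 from current
--         for j in range(2,7): # -2~-6 from current
--             if i-j >= 0 :
--                 temp = max(temp,dp[i-j])
--             else : break
--         dp[i]= temp + A[i]
--
--     return dp[-1]
-- ===== SOURCE B (Python) =====
-- def solution(A):
--     # Forward "push" DP: once dp[i] is final, propagate it to the next up-to-6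
--     # cells; cells start as None and get relaxed upward, instead of each cell
--     # pulling a backward max over its window.
--     n = len(A)
--     dp = [None] * n
--     dp[0] = A[0]
--     for i in range(n):
--         v = dp[i]
--         for j in range(i + 1, min(i + 7, n)):
--             c = v + A[j]
--             if dp[j] is None or c > dp[j]:
--                 dp[j] = c
--     return dp[-1]
-- ===== Notes on version B (the rewrite author's own statement) =====
-- stated objective: alternative
-- what changed: Replaces the backward pull DP (each cell scans dp[i-1..i-6] with a bounds-checked inner loop and break) by a forward push DP: cells start as None and each finalized dp[i] relaxes dp[i+1..i+6] upward, so each cell's value is accumulated from its predecessors' pushes instead of computed by a backward window scan.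
import Mathlib
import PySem

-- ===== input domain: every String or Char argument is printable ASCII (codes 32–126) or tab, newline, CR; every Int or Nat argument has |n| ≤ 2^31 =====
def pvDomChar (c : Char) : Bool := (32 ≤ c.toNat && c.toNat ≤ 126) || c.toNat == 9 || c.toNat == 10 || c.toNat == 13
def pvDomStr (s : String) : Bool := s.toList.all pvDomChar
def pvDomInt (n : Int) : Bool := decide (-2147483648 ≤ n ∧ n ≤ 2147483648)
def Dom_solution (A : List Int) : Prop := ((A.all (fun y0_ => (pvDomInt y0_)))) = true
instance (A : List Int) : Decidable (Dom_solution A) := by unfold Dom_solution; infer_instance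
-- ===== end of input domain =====

-- B replaces A's backward pull DP (each cell scans dp[i-1..i-6]) by a forward push DP:
-- cells start as None and each finalized dp[i] relaxes dp[i+1..i+6] upward (alternative
-- decomposition of the same recurrence, same asymptotic cost).

-- ===== PORT A =====
-- inner loop 'for j in range(2,7): if i-j >= 0: temp = max(temp, dp[i-j]) else: break'
def innerA (dp : List Int) (i : Int) (j : Int) (temp : Int) : Int :=
  if _h : j < 7 then
    if 0 ≤ i - j then
      innerA dp i (j + 1) (max temp (PySem.List.pyGetD dp (i - j) 0))
    else temp
  else temp
termination_by (7 - j).toNat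
decreasing_by omega

def solution (A : List Int) : Int :=
  let n : Int := A.length
  let dp : List Int := List.replicate n.toNat 0
  -- dp[0] = A[0]  (IndexError on empty A: excluded by Pre_; total pyGetD/pySetD forms used)
  let dp := PySem.List.pySetD dp 0 (PySem.List.pyGetD A 0 0)
  let dp := (PySem.List.pyRange 1 n 1).foldl
    (fun dp i =>
      let temp := PySem.List.pyGetD dp (i - 1) 0
      let temp := innerA dp i 2 temp
      PySem.List.pySetD dp i (temp + PySem.List.pyGetD A i 0)) dp
  PySem.List.pyGetD dp (-1) 0

-- ===== PORT B =====
-- inner loop body: 'c = v + A[j]; if dp[j] is None or c > dp[j]: dp[j] = c'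
def fIn (A : List Int) (v : Int) (dp : List (Option Int)) (j : Int) : List (Option Int) :=
  match PySem.List.pyGetD dp j none with
  | none => PySem.List.pySetD dp j (some (v + PySem.List.pyGetD A j 0))
  | some w =>
      if v + PySem.List.pyGetD A j 0 > w then
        PySem.List.pySetD dp j (some (v + PySem.List.pyGetD A j 0))
      else dp

-- outer loop body: 'v = dp[i]; for j in range(i+1, min(i+7, n)): …'
-- (v is never None on any admitted input; the none branch is only a totality guard)
def fOut (A : List Int) (n : Int) (dp : List (Option Int)) (i : Int) : List (Option Int) :=
  match PySem.List.pyGetD dp i none with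
  | none => dp
  | some v => (PySem.List.pyRange (i + 1) (min (i + 7) n) 1).foldl (fIn A v) dp

def solution_alt (A : List Int) : Int :=
  let n : Int := A.length
  let dp : List (Option Int) := List.replicate n.toNat none
  -- dp[0] = A[0]  (IndexError on empty A: excluded by Pre_)
  let dp := PySem.List.pySetD dp 0 (some (PySem.List.pyGetD A 0 0))
  let dp := (PySem.List.pyRange 0 n 1).foldl (fOut A n) dp
  -- return dp[-1]  (always an int here; .getD 0 is a totality guard)
  (PySem.List.pyGetD dp (-1) none).getD 0

-- ===== PRECONDITION & SPEC =====
-- Pre_ excludes only the empty list, on which both A and B raise IndexError at A[0] / dp[0].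
def Pre_solution (A : List Int) : Prop := A ≠ []
instance (A : List Int) : Decidable (Pre_solution A) := by unfold Pre_solution; infer_instance
def pvWitness_solution : List Int := [1, -2, 3]

def Spec_solution (A : List Int) (out : Int) : Prop := out = solution_alt A
instance (A : List Int) (out : Int) : Decidable (Spec_solution A out) := by unfold Spec_solution; infer_instance

-- ===== CLAIM (what is proved, stated in full; the proofs are below) =====
def Claim_equal_solution : Prop := ∀ (A : List Int), Dom_solution A → Pre_solution A → Spec_solution A (solution A)

-- ===== LEMMAS AND PROOFS =====

def pyMaxNE (w : List Int) : Int :=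
  match w with
  | [] => 0
  | h :: t => t.foldl max h

-- Reference: the true dp value of index t, read off a sliding-window fold.
def bStep (w : List Int) (x : Int) : List Int := [pyMaxNE w + x] ++ w.take 5

def Wt (a : Int) (rest : List Int) (t : Nat) : List Int := (rest.take t).foldl bStep [a]
def hD (a : Int) (rest : List Int) (t : Nat) : Int := (Wt a rest t).headD 0

-- max of hD over indices [lo..i] (only meaningful for lo ≤ i; pmax lo 0 = hD 0)
def pmax (a : Int) (rest : List Int) (lo i : Nat) : Int :=
  if i = 0 then hD a rest 0
  else if i ≤ lo then hD a rest i
  else max (pmax a rest lo (i - 1)) (hD a rest i)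
termination_by i
decreasing_by omega

-- ---- shared window-recurrence facts ----

theorem Wt_succ (a : Int) (rest : List Int) (t : Nat) (ht : t < rest.length) :
    Wt a rest (t + 1) = bStep (Wt a rest t) rest[t] := by
  have h : rest.take (t + 1) = rest.take t ++ [rest[t]] := by
    rw [List.take_add_one, List.getElem?_eq_getElem ht]
    rfl
  unfold Wt
  rw [h, List.foldl_append, List.foldl_cons, List.foldl_nil]

theorem Wt_shape (a : Int) (rest : List Int) (t : Nat) (ht : t ≤ rest.length) :
    Wt a rest t = (List.range (min (t + 1) 6)).map (fun k => hD a rest (t - k)) := by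
  induction t with
  | zero => simp [Wt, hD]
  | succ t ih =>
      have ht' : t < rest.length := by omega
      have hstep := Wt_succ a rest t ht'
      have hW := ih (by omega)
      have hhead : hD a rest (t + 1) = pyMaxNE (Wt a rest t) + rest[t] := by
        simp [hD, hstep, bStep]
      have hmin : min (t + 1 + 1) 6 = min (t + 1) 5 + 1 := by omega
      rw [hstep, hmin, List.range_succ_eq_map]
      rw [bStep]
      simp only [List.map_cons, List.map_map, Nat.sub_zero, List.singleton_append]
      congr 1
      · rw [hhead]
      · rw [hW, ← List.map_take, List.take_range]
        have h5 : min 5 (min (t + 1) 6) = min (t + 1) 5 := by omega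
        rw [h5]
        simp [Function.comp, Nat.succ_sub_succ]

theorem hD_zero (a : Int) (rest : List Int) : hD a rest 0 = a := by
  simp [hD, Wt]

theorem pmax_zero (a : Int) (rest : List Int) (lo : Nat) : pmax a rest lo 0 = hD a rest 0 := by
  rw [pmax]
  simp

theorem pmax_self (a : Int) (rest : List Int) (t : Nat) : pmax a rest t t = hD a rest t := by
  rw [pmax]
  by_cases h : t = 0
  · rw [if_pos h, h]
  · rw [if_neg h, if_pos le_rfl]

theorem pmax_succ (a : Int) (rest : List Int) (lo p : Nat) (hlo : lo ≤ p) :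
    pmax a rest lo (p + 1) = max (pmax a rest lo p) (hD a rest (p + 1)) := by
  rw [pmax, if_neg (by omega), if_neg (by omega), Nat.add_sub_cancel]

theorem foldl_max_swap (l : List Int) : ∀ (x y : Int),
    l.foldl max (max x y) = max x (l.foldl max y) := by
  induction l with
  | nil => intro x y; rfl
  | cons h t ih =>
      intro x y
      simp only [List.foldl_cons, max_assoc]
      exact ih x (max y h)

theorem foldl_max_window (a : Int) (rest : List Int) : ∀ (c t : Nat), c ≤ t →
    ((List.range' 1 c).map (fun k => hD a rest (t - k))).foldl max (hD a rest t)
      = pmax a rest (t - c) t := by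
  intro c
  induction c with
  | zero =>
      intro t _
      simp [pmax_self]
  | succ c ih =>
      intro t hct
      have h1 : List.range' 1 (c + 1) = 1 :: List.range' 2 c := by
        simp [List.range'_succ]
      have h2 : (List.range' 2 c).map (fun k => hD a rest (t - k))
          = (List.range' 1 c).map (fun k => hD a rest ((t - 1) - k)) := by
        rw [List.range'_eq_map_range, List.range'_eq_map_range]
        simp only [List.map_map]
        apply List.map_congr_left
        intro k _
        simp only [Function.comp_apply]
        congr 1
        omega
      have hr : pmax a rest (t - 1 - c) t
          = max (pmax a rest (t - 1 - c) (t - 1)) (hD a rest t) := by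
        conv_lhs => rw [pmax]
        rw [if_neg (by omega), if_neg (by omega)]
      rw [h1, List.map_cons, List.foldl_cons, h2, foldl_max_swap,
        ih (t - 1) (by omega),
        show t - (c + 1) = t - 1 - c from by omega, hr]
      exact max_comm _ _

theorem pyMaxNE_Wt (a : Int) (rest : List Int) (t : Nat) (ht : t ≤ rest.length) :
    pyMaxNE (Wt a rest t) = pmax a rest (t - 5) t := by
  rw [Wt_shape a rest t ht]
  have hmin : min (t + 1) 6 = min t 5 + 1 := by omega
  have hr : List.range (min t 5 + 1) = 0 :: List.range' 1 (min t 5) := by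
    rw [List.range_eq_range', List.range'_succ]
  rw [hmin, hr, List.map_cons]
  show ((List.range' 1 (min t 5)).map (fun k => hD a rest (t - k))).foldl max
      (hD a rest (t - 0)) = pmax a rest (t - 5) t
  rw [Nat.sub_zero, foldl_max_window a rest (min t 5) t (by omega)]
  congr 1
  omega

theorem hD_succ (a : Int) (rest : List Int) (t : Nat) (ht : t < rest.length) :
    hD a rest (t + 1) = pmax a rest (t - 5) t + (a :: rest).getD (t + 1) 0 := by
  have hstep := Wt_succ a rest t ht
  have h1 : hD a rest (t + 1) = pyMaxNE (Wt a rest t) + rest[t] := by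
    simp [hD, hstep, bStep]
  rw [h1, pyMaxNE_Wt a rest t (by omega)]
  congr 1
  rw [List.getD_cons_succ]
  simp [List.getD_eq_getElem?_getD, List.getElem?_eq_getElem ht]

-- ===== A-side: dp array invariant =====

-- A's dp array once the entries at indices ≤ i are finalized (later entries still 0)
def dpArr (a : Int) (rest : List Int) (n i : Nat) : List Int :=
  (List.range n).map (fun j => if j ≤ i then hD a rest j else 0)

-- A's outer-loop body with the lets inlined (definitionally the lambda in `solution`)
def bodyA (A : List Int) (dp : List Int) (i : Int) : List Int :=
  PySem.List.pySetD dp i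
    (innerA dp i 2 (PySem.List.pyGetD dp (i - 1) 0) + PySem.List.pyGetD A i 0)

theorem dpArr_zero (a : Int) (rest : List Int) (n : Nat) (_hn : n = rest.length + 1) :
    PySem.List.pySetD (List.replicate n (0 : Int)) 0 (PySem.List.pyGetD (a :: rest) 0 0)
      = dpArr a rest n 0 := by
  have h0 : PySem.List.pySetD (List.replicate n (0 : Int)) 0 (PySem.List.pyGetD (a :: rest) 0 0)
      = (List.replicate n (0 : Int)).set 0 a := by
    have := PySem.List.pySetD_natCast (List.replicate n (0 : Int)) 0 (a : Int)
    simpa [PySem.List.pyGetD_zero_cons] using this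
  rw [h0, dpArr]
  apply List.ext_getElem (by simp)
  intro i h1 h2
  by_cases hi : i = 0
  · subst hi
    simp [hD_zero]
  · simp [List.getElem_set, hi]
    intro h
    exact absurd h.symm hi

theorem innerA_eval (dp : List Int) (k : Nat) (temp : Int) (f j : Nat) (hf : j + f = 7)
    (hj : 2 ≤ j) :
    innerA dp (k : Int) (j : Int) temp
      = ((List.range' j (min 6 k + 1 - j)).map
          (fun (j' : Nat) => PySem.List.pyGetD dp ((k : Int) - (j' : Int)) 0)).foldl max temp := by
  induction f generalizing j temp with
  | zero =>
      have hj7 : j = 7 := by omega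
      subst hj7
      have hlen : min 6 k + 1 - 7 = 0 := by omega
      rw [hlen, innerA]
      norm_num
  | succ f ih =>
      have hjle : j ≤ 6 := by omega
      have hjlt : (j : Int) < 7 := by exact_mod_cast by omega
      rw [innerA, dif_pos hjlt]
      by_cases hk : j ≤ k
      · have h0 : (0 : Int) ≤ (k : Int) - (j : Int) := by
          have : (j : Int) ≤ (k : Int) := by exact_mod_cast hk
          omega
        rw [if_pos h0]
        have hcast : ((j : Int) + 1) = ((j + 1 : Nat) : Int) := by push_cast; ring
        rw [hcast, ih (max temp (PySem.List.pyGetD dp ((k:Int) - (j:Int)) 0)) (j + 1)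
          (by omega) (by omega)]
        have hlen : min 6 k + 1 - j = (min 6 k + 1 - (j + 1)) + 1 := by omega
        rw [hlen, List.range'_succ]
        simp
      · have h0 : ¬ (0 : Int) ≤ (k : Int) - (j : Int) := by
          have : (k : Int) < (j : Int) := by exact_mod_cast by omega
          omega
        rw [if_neg h0]
        have hlen : min 6 k + 1 - j = 0 := by omega
        rw [hlen]
        simp

theorem pyGetD_dpArr (a : Int) (rest : List Int) (n i m : Nat) (hm : m < n) (hmi : m ≤ i) :
    PySem.List.pyGetD (dpArr a rest n i) (m : Int) 0 = hD a rest m := by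
  rw [dpArr, PySem.List.pyGetD_natCast, PySem.List.getD_map_range _ _ _ _ hm, if_pos hmi]

theorem innerA_pyMax (a : Int) (rest : List Int) (n k : Nat) (hn : n = rest.length + 1)
    (h1 : 1 ≤ k) (hk : k < n) :
    innerA (dpArr a rest n (k - 1)) (k : Int) 2 (hD a rest (k - 1))
      = pyMaxNE (Wt a rest (k - 1)) := by
  have h2 : ((2 : Nat) : Int) = (2 : Int) := by norm_num
  rw [← h2, innerA_eval (dpArr a rest n (k - 1)) k (hD a rest (k - 1)) 5 2 rfl le_rfl]
  rw [Wt_shape a rest (k - 1) (by omega)]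
  have hmk : min (k - 1 + 1) 6 = (min k 6 - 1) + 1 := by omega
  rw [hmk, List.range_succ_eq_map]
  simp only [List.map_cons, List.map_map, Nat.sub_zero, pyMaxNE]
  have hlen : min 6 k + 1 - 2 = min k 6 - 1 := by omega
  rw [hlen]
  congr 1
  apply List.ext_getElem (by simp)
  intro q hq1 hq2
  have hq' : q < min k 6 - 1 := by simpa using hq2
  simp only [List.getElem_map, List.getElem_range', Function.comp_apply, List.getElem_range]
  have hle : 2 + q ≤ k := by omega
  have hcast : (k : Int) - ((2 + 1 * q : Nat) : Int) = ((k - (2 + q) : Nat) : Int) := by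
    push_cast
    omega
  rw [hcast, pyGetD_dpArr a rest n (k - 1) (k - (2 + q)) (by omega) (by omega)]
  congr 1
  omega

theorem bodyA_step (a : Int) (rest : List Int) (n k : Nat) (hn : n = rest.length + 1)
    (h1 : 1 ≤ k) (hk : k < n) :
    bodyA (a :: rest) (dpArr a rest n (k - 1)) (k : Int) = dpArr a rest n k := by
  unfold bodyA
  have hprev : PySem.List.pyGetD (dpArr a rest n (k - 1)) ((k : Int) - 1) 0
      = hD a rest (k - 1) := by
    have hcast : (k : Int) - 1 = ((k - 1 : Nat) : Int) := by
      push_cast [Nat.cast_sub h1]; ring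
    rw [hcast]
    exact pyGetD_dpArr a rest n (k - 1) (k - 1) (by omega) le_rfl
  have hgetA : PySem.List.pyGetD (a :: rest) (k : Int) 0 = rest[k - 1]'(by omega) := by
    rw [PySem.List.pyGetD_natCast]
    rcases Nat.exists_eq_add_of_le h1 with ⟨m, hm⟩
    subst hm
    simp only [Nat.add_comm 1 m] at *
    rw [List.getD_cons_succ]
    have hmlen : m < rest.length := by omega
    simp [List.getD_eq_getElem?_getD, List.getElem?_eq_getElem hmlen]
  rw [hprev, innerA_pyMax a rest n k hn h1 hk, hgetA]
  have hk1 : hD a rest k = pyMaxNE (Wt a rest (k - 1)) + rest[k - 1]'(by omega) := by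
    have hstep := Wt_succ a rest (k - 1) (by omega)
    have hkk : k - 1 + 1 = k := by omega
    rw [hkk] at hstep
    simp [hD, hstep, bStep]
  rw [← hk1, PySem.List.pySetD_natCast]
  apply List.ext_getElem (by simp [dpArr])
  intro i hi1 hi2
  have hin : i < n := by simpa [dpArr] using hi2
  by_cases hik : i = k
  · subst hik
    simp [dpArr]
  · rw [List.getElem_set_ne (by omega)]
    simp only [dpArr, List.getElem_map, List.getElem_range]
    by_cases hle : i ≤ k
    · rw [if_pos (by omega : i ≤ k - 1), if_pos hle]
    · rw [if_neg (by omega : ¬ i ≤ k - 1), if_neg hle]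

theorem foldA (a : Int) (rest : List Int) (n : Nat) (hn : n = rest.length + 1) (k : Nat)
    (h1 : 1 ≤ k) (hk : k ≤ n) :
    (PySem.List.pyRange 1 (k : Int) 1).foldl (bodyA (a :: rest)) (dpArr a rest n 0)
      = dpArr a rest n (k - 1) := by
  induction k with
  | zero => omega
  | succ k ih =>
      by_cases hk0 : k = 0
      · subst hk0
        have hone : ((0 + 1 : Nat) : Int) = 1 := by norm_num
        rw [hone, show PySem.List.pyRange 1 1 1 = [] from by decide, List.foldl_nil]
      · have h1k : 1 ≤ k := by omega
        have hcast : ((k + 1 : Nat) : Int) = ((k : Nat) : Int) + 1 := by push_cast; ring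
        have hone : (1 : Int) ≤ ((k : Nat) : Int) := by exact_mod_cast h1k
        rw [hcast, PySem.List.pyRange_one_succ_right hone, List.foldl_append,
          ih h1k (by omega), List.foldl_cons, List.foldl_nil,
          bodyA_step a rest n k hn h1k (by omega)]
        norm_num

theorem solution_eq_hD (a : Int) (rest : List Int) :
    solution (a :: rest) = hD a rest rest.length := by
  show PySem.List.pyGetD
      ((PySem.List.pyRange 1 ((a :: rest).length : Int) 1).foldl (bodyA (a :: rest))
        (PySem.List.pySetD (List.replicate ((a :: rest).length : Int).toNat 0) 0
          (PySem.List.pyGetD (a :: rest) 0 0))) (-1) 0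
    = hD a rest rest.length
  have hlen : ((a :: rest).length : Int).toNat = rest.length + 1 := by simp
  rw [hlen, dpArr_zero a rest (rest.length + 1) rfl]
  have hlen2 : ((a :: rest).length : Int) = ((rest.length + 1 : Nat) : Int) := by simp
  rw [hlen2, foldA a rest (rest.length + 1) rfl (rest.length + 1) (by omega) le_rfl]
  have hne : dpArr a rest (rest.length + 1) (rest.length + 1 - 1) ≠ [] := by
    simp [dpArr]
  rw [PySem.List.pyGetD_neg_one _ _ hne, List.getLast_eq_getElem]
  simp [dpArr]

-- ===== B-side: push-state invariant =====

def relax (o : Option Int) (c : Int) : Option Int :=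
  match o with
  | none => some c
  | some w => if c > w then some c else some w

theorem relax_none (c : Int) : relax none c = some c := rfl
theorem relax_some (w c : Int) : relax (some w) c = if c > w then some c else some w := rfl

-- initial state: only dp[0] set
def st0 (a : Int) (rest : List Int) (n : Nat) : List (Option Int) :=
  (List.range n).map (fun m => if m = 0 then some (hD a rest 0) else none)

-- state after the outer loop has processed indices 0..p
def stB (a : Int) (rest : List Int) (n p : Nat) : List (Option Int) :=
  (List.range n).map (fun m =>
    if m ≤ p + 1 then some (hD a rest m)
    else if m ≤ p + 6 then some (pmax a rest (m - 6) p + (a :: rest).getD m 0)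
    else none)

theorem pyGetD_map_range_opt (f : Nat → Option Int) (n m : Nat) (hm : m < n) :
    PySem.List.pyGetD ((List.range n).map f) (m : Int) none = f m := by
  rw [PySem.List.pyGetD_natCast, PySem.List.getD_map_range _ _ _ _ hm]

theorem fOut_eq_of_get (A : List Int) (nI : Int) (dp : List (Option Int)) (i : Int) (v : Int)
    (h : PySem.List.pyGetD dp i none = some v) :
    fOut A nI dp i = (PySem.List.pyRange (i + 1) (min (i + 7) nI) 1).foldl (fIn A v) dp := by
  unfold fOut
  rw [h]

theorem getD_A_nat (a : Int) (rest : List Int) (m : Nat) :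
    PySem.List.pyGetD (a :: rest) (m : Int) 0 = (a :: rest).getD m 0 := by
  rw [PySem.List.pyGetD_natCast]

theorem fold_fIn (A : List Int) (v : Int) (n : Nat) (e : Nat → Option Int) :
    ∀ (c lo : Nat), lo + c ≤ n →
    (PySem.List.pyRange (lo : Int) ((lo + c : Nat) : Int) 1).foldl (fIn A v)
        ((List.range n).map e)
      = (List.range n).map (fun m =>
          if lo ≤ m ∧ m < lo + c then relax (e m) (v + PySem.List.pyGetD A (m : Int) 0)
          else e m) := by
  intro c
  induction c with
  | zero =>
      intro lo _
      rw [Nat.add_zero, PySem.List.pyRange_one_eq_nil le_rfl, List.foldl_nil]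
      apply List.map_congr_left
      intro m _
      rw [if_neg (by omega)]
  | succ c ih =>
      intro lo hcn
      have hcast : ((lo + (c + 1) : Nat) : Int) = ((lo + c : Nat) : Int) + 1 := by
        push_cast; ring
      have hle : (lo : Int) ≤ ((lo + c : Nat) : Int) := by exact_mod_cast Nat.le_add_right lo c
      rw [hcast, PySem.List.pyRange_one_succ_right hle, List.foldl_append,
        ih lo (by omega), List.foldl_cons, List.foldl_nil]
      have hjn : lo + c < n := by omega
      -- the entry at index lo+c before this step is e (lo+c)
      have hget : PySem.List.pyGetD
          ((List.range n).map (fun m =>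
            if lo ≤ m ∧ m < lo + c then relax (e m) (v + PySem.List.pyGetD A (m : Int) 0)
            else e m)) ((lo + c : Nat) : Int) none = e (lo + c) := by
        rw [pyGetD_map_range_opt _ n (lo + c) hjn, if_neg (by omega)]
      -- setting index lo+c pointwise
      have hset : ∀ (o : Option Int),
          PySem.List.pySetD
            ((List.range n).map (fun m =>
              if lo ≤ m ∧ m < lo + c then relax (e m) (v + PySem.List.pyGetD A (m : Int) 0)
              else e m)) ((lo + c : Nat) : Int) o
          = (List.range n).map (fun m =>
              if m = lo + c then o
              else if lo ≤ m ∧ m < lo + c then relax (e m) (v + PySem.List.pyGetD A (m : Int) 0)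
              else e m) := by
        intro o
        rw [PySem.List.pySetD_natCast]
        apply List.ext_getElem (by simp)
        intro i h1 h2
        have hi : i < n := by simpa using h2
        by_cases hic : i = lo + c
        · subst hic
          rw [List.getElem_set_self (by simpa using hjn)]
          simp
        · rw [List.getElem_set_ne (by omega)]
          simp only [List.getElem_map, List.getElem_range]
          rw [if_neg hic]
      cases he : e (lo + c) with
      | none =>
          simp only [fIn, hget.trans he]
          rw [hset (some (v + PySem.List.pyGetD A ((lo + c : Nat) : Int) 0))]
          apply List.map_congr_left
          intro m _
          by_cases hm : m = lo + c
          · subst hm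
            rw [if_pos rfl, if_pos (by omega), he, relax_none]
          · rw [if_neg hm]
            by_cases h2 : lo ≤ m ∧ m < lo + c
            · rw [if_pos h2, if_pos (by omega)]
            · rw [if_neg h2, if_neg (by omega)]
      | some w =>
          simp only [fIn, hget.trans he]
          by_cases hgt : v + PySem.List.pyGetD A ((lo + c : Nat) : Int) 0 > w
          · rw [if_pos hgt, hset (some (v + PySem.List.pyGetD A ((lo + c : Nat) : Int) 0))]
            apply List.map_congr_left
            intro m _
            by_cases hm : m = lo + c
            · subst hm
              rw [if_pos rfl, if_pos (by omega), he, relax_some, if_pos hgt]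
            · rw [if_neg hm]
              by_cases h2 : lo ≤ m ∧ m < lo + c
              · rw [if_pos h2, if_pos (by omega)]
              · rw [if_neg h2, if_neg (by omega)]
          · rw [if_neg hgt]
            apply List.map_congr_left
            intro m _
            by_cases hm : m = lo + c
            · subst hm
              rw [if_neg (by omega : ¬ (lo ≤ lo + c ∧ lo + c < lo + c)),
                if_pos (by omega : lo ≤ lo + c ∧ lo + c < lo + (c + 1)), he, relax_some,
                if_neg hgt]
            · by_cases h2 : lo ≤ m ∧ m < lo + c
              · rw [if_pos h2, if_pos (by omega)]
              · rw [if_neg h2, if_neg (by omega)]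

-- first outer iteration: st0 → stB 0
theorem fOut_st0 (a : Int) (rest : List Int) (n : Nat) (hn : n = rest.length + 1) :
    fOut (a :: rest) (n : Int) (st0 a rest n) 0 = stB a rest n 0 := by
  have h0 : PySem.List.pyGetD (st0 a rest n) 0 none = some (hD a rest 0) := by
    have := pyGetD_map_range_opt (fun m => if m = 0 then some (hD a rest 0) else none)
      n 0 (by omega)
    simpa [st0] using this
  rw [fOut_eq_of_get _ _ _ _ _ h0]
  have hlo : (0 : Int) + 1 = ((1 : Nat) : Int) := by norm_num
  have hbound : min ((0 : Int) + 7) ((n : Nat) : Int) = ((1 + (min 7 n - 1) : Nat) : Int) := by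
    push_cast; omega
  rw [hlo, hbound, st0,
    fold_fIn (a :: rest) (hD a rest 0) n
      (fun m => if m = 0 then some (hD a rest 0) else none) (min 7 n - 1) 1 (by omega),
    stB]
  apply List.map_congr_left
  intro m hm
  have hmn : m < n := by simpa using hm
  by_cases hm0 : m = 0
  · subst hm0
    rw [if_neg (by omega : ¬ ((1:Nat) ≤ 0 ∧ 0 < 1 + (min 7 n - 1))), if_pos rfl,
      if_pos (by omega : (0:Nat) ≤ 0 + 1)]
  · by_cases hm1 : 1 ≤ m ∧ m < 1 + (min 7 n - 1)
    · rw [if_pos hm1, if_neg hm0, relax_none]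
      by_cases hmm : m ≤ 0 + 1
      · have hm1' : m = 1 := by omega
        subst hm1'
        rw [if_pos (by omega : (1:Nat) ≤ 0 + 1), hD_succ a rest 0 (by omega), pmax_zero,
          getD_A_nat]
      · rw [if_neg hmm, if_pos (by omega : m ≤ 0 + 6), pmax_zero, getD_A_nat]
    · rw [if_neg hm1, if_neg hm0, if_neg (by omega : ¬ m ≤ 0 + 1),
        if_neg (by omega : ¬ m ≤ 0 + 6)]

-- outer iteration p+1: stB p → stB (p+1)
theorem fOut_step (a : Int) (rest : List Int) (n p : Nat) (hn : n = rest.length + 1)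
    (hp : p + 1 < n) :
    fOut (a :: rest) (n : Int) (stB a rest n p) ((p + 1 : Nat) : Int) = stB a rest n (p + 1) := by
  have hv : PySem.List.pyGetD (stB a rest n p) ((p + 1 : Nat) : Int) none
      = some (hD a rest (p + 1)) := by
    have := pyGetD_map_range_opt (fun m =>
      if m ≤ p + 1 then some (hD a rest m)
      else if m ≤ p + 6 then some (pmax a rest (m - 6) p + (a :: rest).getD m 0)
      else none) n (p + 1) hp
    rw [stB, this]
    simp
  rw [fOut_eq_of_get _ _ _ _ _ hv]
  have hu : p + 2 ≤ min (p + 8) n := by omega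
  have hlo : ((p + 1 : Nat) : Int) + 1 = ((p + 2 : Nat) : Int) := by push_cast; ring
  have hbound : min (((p + 1 : Nat) : Int) + 7) ((n : Nat) : Int)
      = ((p + 2 + (min (p + 8) n - (p + 2)) : Nat) : Int) := by
    push_cast; omega
  rw [hlo, hbound, stB,
    fold_fIn (a :: rest) (hD a rest (p + 1)) n
      (fun m => if m ≤ p + 1 then some (hD a rest m)
        else if m ≤ p + 6 then some (pmax a rest (m - 6) p + (a :: rest).getD m 0)
        else none) (min (p + 8) n - (p + 2)) (p + 2) (by omega),
    stB]
  apply List.map_congr_left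
  intro m hm
  have hmn : m < n := by simpa using hm
  by_cases hin : p + 2 ≤ m ∧ m < p + 2 + (min (p + 8) n - (p + 2))
  · -- m is relaxed in this pass: p+2 ≤ m ≤ p+7, m < n
    have hm7 : m ≤ p + 7 := by omega
    rw [if_pos hin]
    by_cases h6 : m ≤ p + 6
    · rw [if_neg (by omega : ¬ m ≤ p + 1), if_pos h6, relax_some, getD_A_nat,
        pmax_succ a rest (m - 6) p (by omega)]
      have hkey : (if hD a rest (p + 1) + (a :: rest).getD m 0 >
            pmax a rest (m - 6) p + (a :: rest).getD m 0
          then some (hD a rest (p + 1) + (a :: rest).getD m 0)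
          else some (pmax a rest (m - 6) p + (a :: rest).getD m 0))
          = some (max (pmax a rest (m - 6) p) (hD a rest (p + 1)) + (a :: rest).getD m 0) := by
        by_cases hgt : hD a rest (p + 1) + (a :: rest).getD m 0 >
            pmax a rest (m - 6) p + (a :: rest).getD m 0
        · rw [if_pos hgt, max_eq_right (by omega : pmax a rest (m - 6) p ≤ hD a rest (p + 1))]
        · rw [if_neg hgt, max_eq_left (by omega : hD a rest (p + 1) ≤ pmax a rest (m - 6) p)]
      rw [hkey]
      by_cases hm2 : m ≤ p + 1 + 1
      · have hm2' : m = p + 2 := by omega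
        subst hm2'
        rw [if_pos (by omega : p + 2 ≤ p + 1 + 1)]
        rw [show p + 2 = p + 1 + 1 from rfl, hD_succ a rest (p + 1) (by omega),
          show p + 1 + 1 - 6 = p + 1 - 5 from by omega,
          pmax_succ a rest (p + 1 - 5) p (by omega)]
      · rw [if_neg hm2, if_pos (by omega : m ≤ p + 1 + 6)]
    · -- m = p+7: old entry none
      have hm7' : m = p + 7 := by omega
      subst hm7'
      rw [if_neg (by omega : ¬ p + 7 ≤ p + 1), if_neg (by omega : ¬ p + 7 ≤ p + 6), relax_none,
        if_neg (by omega : ¬ p + 7 ≤ p + 1 + 1), if_pos (by omega : p + 7 ≤ p + 1 + 6),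
        getD_A_nat, show p + 7 - 6 = p + 1 from by omega, pmax_self]
  · -- untouched entries
    rw [if_neg hin]
    by_cases hm1 : m ≤ p + 1
    · rw [if_pos hm1, if_pos (by omega : m ≤ p + 1 + 1)]
    · have hbig : p + 8 ≤ m := by omega
      rw [if_neg hm1, if_neg (by omega : ¬ m ≤ p + 6), if_neg (by omega : ¬ m ≤ p + 1 + 1),
        if_neg (by omega : ¬ m ≤ p + 1 + 6)]

theorem foldB (a : Int) (rest : List Int) (n : Nat) (hn : n = rest.length + 1) (p : Nat)
    (hp : p < n) :
    (PySem.List.pyRange 0 ((p + 1 : Nat) : Int) 1).foldl (fOut (a :: rest) (n : Int))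
        (st0 a rest n)
      = stB a rest n p := by
  induction p with
  | zero =>
      rw [show ((0 + 1 : Nat) : Int) = (0 : Int) + 1 from by norm_num,
        PySem.List.pyRange_one_succ_right (by norm_num), PySem.List.pyRange_one_eq_nil le_rfl,
        List.nil_append, List.foldl_cons, List.foldl_nil]
      exact fOut_st0 a rest n hn
  | succ p ih =>
      have hcast : ((p + 1 + 1 : Nat) : Int) = ((p + 1 : Nat) : Int) + 1 := by push_cast; ring
      rw [hcast, PySem.List.pyRange_one_succ_right (by positivity), List.foldl_append,
        ih (by omega), List.foldl_cons, List.foldl_nil]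
      exact fOut_step a rest n p hn (by omega)

theorem st0_eq (a : Int) (rest : List Int) (n : Nat) (hn : n = rest.length + 1) :
    PySem.List.pySetD (List.replicate n (none : Option Int)) 0
        (some (PySem.List.pyGetD (a :: rest) 0 0)) = st0 a rest n := by
  have h0 : PySem.List.pySetD (List.replicate n (none : Option Int)) 0
      (some (PySem.List.pyGetD (a :: rest) 0 0))
      = (List.replicate n (none : Option Int)).set 0 (some a) := by
    have := PySem.List.pySetD_natCast (List.replicate n (none : Option Int)) 0 (some a)
    simpa [PySem.List.pyGetD_zero_cons] using this
  rw [h0, st0]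
  apply List.ext_getElem (by simp)
  intro i h1 h2
  by_cases hi : i = 0
  · subst hi
    simp [hD_zero]
  · simp [List.getElem_set, hi]
    intro h
    exact absurd h.symm hi

theorem solution_alt_eq_hD (a : Int) (rest : List Int) :
    solution_alt (a :: rest) = hD a rest rest.length := by
  show (PySem.List.pyGetD
      ((PySem.List.pyRange 0 ((a :: rest).length : Int) 1).foldl
        (fOut (a :: rest) ((a :: rest).length : Int))
        (PySem.List.pySetD (List.replicate ((a :: rest).length : Int).toNat none) 0
          (some (PySem.List.pyGetD (a :: rest) 0 0)))) (-1) none).getD 0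
    = hD a rest rest.length
  have hlen : ((a :: rest).length : Int).toNat = rest.length + 1 := by simp
  have hlen2 : ((a :: rest).length : Int) = ((rest.length + 1 : Nat) : Int) := by simp
  rw [hlen, hlen2, st0_eq a rest (rest.length + 1) rfl,
    foldB a rest (rest.length + 1) rfl rest.length (by omega)]
  have hne : stB a rest (rest.length + 1) rest.length ≠ [] := by
    simp [stB]
  rw [PySem.List.pyGetD_neg_one _ _ hne, List.getLast_eq_getElem]
  simp [stB]

-- ===== VERDICT (by name: the statement is the Claim_ definition above) =====
theorem solution_spec : Claim_equal_solution := by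
  intro A _hDom hPre
  unfold Spec_solution
  match A with
  | [] => exact absurd rfl hPre
  | a :: rest => rw [solution_alt_eq_hD, solution_eq_hD]
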